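-- pv_equiv track=rewrite | github.com/mssm-ar/model_overview | model_list.py | lines_grouped_by_prefix
-- ===== SOURCE A (Python) =====
-- def vendor_prefix(model_id: str) -> str:
--     return model_id.split("/", 1)[0] if "/" in model_id else model_id
--
-- def sort_by_prefix(ids: list[str]) -> list[str]:
--     return sorted(ids, key=lambda x: (vendor_prefix(x).lower(), x.lower()))
--
-- def lines_grouped_by_prefix(ids: list[str]) -> list[str]:
--     """Sorted ids with a blank line between each vendor prefix block."""
--     ordered = sort_by_prefix(ids)
--     lines: list[str] = []
--     prev_prefix: str | None = None
--     for mid in ordered: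
--         p = vendor_prefix(mid)
--         if prev_prefix is not None and p != prev_prefix:
--             lines.append("")
--         lines.append(mid)
--         prev_prefix = p
--     return lines
-- ===== SOURCE B (Python) =====
-- def vendor_prefix(model_id: str) -> str:
--     return model_id.split("/", 1)[0] if "/" in model_id else model_id
--
-- def _split_run(xs, p):
--     """Longest leading run of xs whose vendor_prefix == p, plus the remainder."""
--     a = []
--     for i, x in enumerate(xs):
--         if vendor_prefix(x) != p:
--             return a, xs[i:]
--         a.append(x)
--     return a, []
--
-- def _blocks(xs):
--     """Partition xs into maximal consecutive runs of equal vendor_prefix."""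
--     bs = []
--     rest = xs
--     while rest:
--         a, b = _split_run(rest, vendor_prefix(rest[0]))
--         bs.append(a)
--         rest = b
--     return bs
--
-- def lines_grouped_by_prefix(ids: list[str]) -> list[str]:
--     """Sorted ids with a blank line between each vendor prefix block."""
--     ordered = sorted(ids, key=lambda x: (vendor_prefix(x).lower(), x.lower()))
--     out: list[str] = []
--     for blk in _blocks(ordered):
--         if out:
--             out.append("")
--         out.extend(blk)
--     return out
-- ===== Notes on version B (the rewrite author's own statement) =====
-- stated objective: alternative
-- what changed: Replaces A's single pass with a running prev_prefix sentinel by an explicit group-then-interleave decomposition: first partition the sorted ids into maximal consecutive runs of equal vendor prefix, then flatten the runs with a blank-line separator between them.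
import Mathlib
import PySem

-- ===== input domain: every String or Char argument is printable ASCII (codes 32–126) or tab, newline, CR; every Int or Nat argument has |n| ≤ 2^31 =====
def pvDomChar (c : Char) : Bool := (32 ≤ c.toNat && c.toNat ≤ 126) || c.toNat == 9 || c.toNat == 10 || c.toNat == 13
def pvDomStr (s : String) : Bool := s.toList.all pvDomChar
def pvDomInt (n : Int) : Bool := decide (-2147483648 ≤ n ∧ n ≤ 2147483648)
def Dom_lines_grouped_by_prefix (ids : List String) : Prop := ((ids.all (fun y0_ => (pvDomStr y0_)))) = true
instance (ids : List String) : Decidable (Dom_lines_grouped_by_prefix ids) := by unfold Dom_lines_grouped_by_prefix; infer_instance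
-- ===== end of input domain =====

-- B replaces A's prev_prefix single pass by run-partitioning then interleaving blanks (alternative decomposition; same cost).

-- ===== PORT A =====
-- vendor_prefix (shared helper of both Pythons)
def pvVendorPrefix (s : String) : String :=
  if PySem.Str.isIn "/" s then ((PySem.Str.splitMax? s "/" 1).getD []).headD ""
  else s

-- the shared sort: sorted(ids, key=lambda x: (vendor_prefix(x).lower(), x.lower()))
def pvSortByPrefix (ids : List String) : List String :=
  PySem.List.sorted2 ids (fun x => PySem.Str.lower (pvVendorPrefix x)) (fun x => PySem.Str.lower x)

-- A's loop body: state = (lines, prev_prefix)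
def pvAStep (st : List String × Option String) (mid : String) : List String × Option String :=
  let p := pvVendorPrefix mid
  let lines := if st.2 ≠ none ∧ some p ≠ st.2 then st.1 ++ [""] else st.1
  (lines ++ [mid], some p)

def lines_grouped_by_prefix (ids : List String) : List String :=
  let ordered := pvSortByPrefix ids
  (ordered.foldl pvAStep ([], none)).1

-- ===== PORT B =====
-- _split_run: longest leading run with vendor_prefix == p, plus remainder (early return at first mismatch)
def pvSplitRun : List String → String → List String × List String
  | [], _ => ([], [])
  | x :: rest, p =>
    if pvVendorPrefix x ≠ p then ([], x :: rest)
    else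
      let ab := pvSplitRun rest p
      (x :: ab.1, ab.2)

theorem pvSplitRun_snd_length (xs : List String) (p : String) :
    (pvSplitRun xs p).2.length ≤ xs.length := by
  induction xs with
  | nil => simp [pvSplitRun]
  | cons x rest ih =>
    simp only [pvSplitRun]
    split
    · simp
    · simpa using Nat.le_succ_of_le ih

-- _blocks: while rest: split off one run
def pvBlocks (xs : List String) : List (List String) :=
  match xs with
  | [] => []
  | x :: t =>
    let ab := pvSplitRun (x :: t) (pvVendorPrefix x)
    ab.1 :: pvBlocks ab.2
termination_by xs.length
decreasing_by
  simp only [pvSplitRun, ne_eq, not_true_eq_false, if_false, List.length_cons]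
  exact Nat.lt_succ_of_le (pvSplitRun_snd_length t (pvVendorPrefix x))

-- B's flatten loop body
def pvBStep (out : List String) (b : List String) : List String :=
  (if out ≠ [] then out ++ [""] else out) ++ b

def lines_grouped_by_prefix_alt (ids : List String) : List String :=
  let ordered := pvSortByPrefix ids
  (pvBlocks ordered).foldl pvBStep []

-- ===== PRECONDITION & SPEC =====
def Spec_lines_grouped_by_prefix (ids : List String) (out : List String) : Prop := out = lines_grouped_by_prefix_alt ids
instance (ids : List String) (out : List String) : Decidable (Spec_lines_grouped_by_prefix ids out) := by unfold Spec_lines_grouped_by_prefix; infer_instance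

-- ===== CLAIM (what is proved, stated in full; the proofs are below) =====
def Claim_equal_lines_grouped_by_prefix : Prop := ∀ (ids : List String), Dom_lines_grouped_by_prefix ids → Spec_lines_grouped_by_prefix ids (lines_grouped_by_prefix ids)

-- ===== LEMMAS AND PROOFS =====

theorem pvSplitRun_append (xs : List String) (p : String) :
    (pvSplitRun xs p).1 ++ (pvSplitRun xs p).2 = xs := by
  induction xs with
  | nil => simp [pvSplitRun]
  | cons x rest ih =>
    simp only [pvSplitRun]
    split
    · simp
    · simpa using ih

theorem pvSplitRun_fst_prefix (xs : List String) (p : String) :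
    ∀ x ∈ (pvSplitRun xs p).1, pvVendorPrefix x = p := by
  induction xs with
  | nil => simp [pvSplitRun]
  | cons x rest ih =>
    simp only [pvSplitRun]
    split
    · simp
    · rename_i h
      intro y hy
      rcases List.mem_cons.mp hy with rfl | hy
      · simpa using h
      · exact ih y hy

theorem pvSplitRun_snd_head (xs : List String) (p : String) (y : String) (t : List String)
    (h : (pvSplitRun xs p).2 = y :: t) : pvVendorPrefix y ≠ p := by
  induction xs with
  | nil => simp [pvSplitRun] at h
  | cons x rest ih =>
    simp only [pvSplitRun] at h
    split at h
    · rename_i hne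
      injection h with h1 h2
      subst h1
      exact hne
    · exact ih (by simpa using h)

-- A's loop absorbs a run of equal prefix with no blank line
theorem pvAStep_run (run : List String) (p : String) (hrun : ∀ x ∈ run, pvVendorPrefix x = p)
    (rest : List String) (acc : List String) :
    List.foldl pvAStep (acc, some p) (run ++ rest)
      = List.foldl pvAStep (acc ++ run, some p) rest := by
  induction run generalizing acc with
  | nil => simp
  | cons x r ih =>
    have hx : pvVendorPrefix x = p := hrun x (List.mem_cons_self ..)
    simp only [List.cons_append, List.foldl_cons]
    have hstep : pvAStep (acc, some p) x = (acc ++ [x], some p) := by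
      simp [pvAStep, hx]
    rw [hstep, ih (fun y hy => hrun y (List.mem_cons_of_mem _ hy))]
    simp

-- main invariant: after the first block, A's loop equals B's block fold
theorem pvMain (n : Nat) : ∀ (l : List String), l.length ≤ n → ∀ (acc : List String) (q : String),
    acc ≠ [] → (∀ y t, l = y :: t → pvVendorPrefix y ≠ q) →
    (List.foldl pvAStep (acc, some q) l).1 = List.foldl pvBStep acc (pvBlocks l) := by
  induction n with
  | zero =>
    intro l hl acc q _ _
    have hnil : l = [] := List.eq_nil_of_length_eq_zero (Nat.le_zero.mp hl)
    subst hnil; simp [pvBlocks]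
  | succ n ih =>
    intro l hl acc q hacc hq
    match l with
    | [] => simp [pvBlocks]
    | x :: t =>
      have hxq : pvVendorPrefix x ≠ q := hq x t rfl
      set p := pvVendorPrefix x with hp
      set a := (pvSplitRun t p).1 with ha
      set b := (pvSplitRun t p).2 with hb
      have hstep : pvAStep (acc, some q) x = (acc ++ [""] ++ [x], some p) := by
        simp [pvAStep, ← hp, hxq]
      have hblocks : pvBlocks (x :: t) = (x :: a) :: pvBlocks b := by
        conv_lhs => rw [pvBlocks]
        simp only [pvSplitRun, ← hp, ne_eq, not_true_eq_false, if_false, ← ha, ← hb]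
      have hsplit : a ++ b = t := pvSplitRun_append t p
      have hlenb : b.length ≤ n := by
        have h1 : b.length ≤ t.length := hb ▸ pvSplitRun_snd_length t p
        simp only [List.length_cons] at hl
        omega
      have hbhead : ∀ y s, b = y :: s → pvVendorPrefix y ≠ p :=
        fun y s h => pvSplitRun_snd_head t p y s (by rw [← hb]; exact h)
      calc (List.foldl pvAStep (acc, some q) (x :: t)).1
          = (List.foldl pvAStep (acc ++ [""] ++ [x], some p) (a ++ b)).1 := by
            rw [List.foldl_cons, hstep, hsplit]
        _ = (List.foldl pvAStep ((acc ++ [""] ++ [x]) ++ a, some p) b).1 := by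
            rw [pvAStep_run a p (pvSplitRun_fst_prefix t p) b]
        _ = List.foldl pvBStep ((acc ++ [""] ++ [x]) ++ a) (pvBlocks b) :=
            ih b hlenb _ p (by simp) hbhead
        _ = List.foldl pvBStep acc (pvBlocks (x :: t)) := by
            rw [hblocks, List.foldl_cons]
            have : pvBStep acc (x :: a) = (acc ++ [""] ++ [x]) ++ a := by
              simp [pvBStep, hacc]
            rw [this]

-- ===== VERDICT (by name: the statement is the Claim_ definition above) =====
theorem lines_grouped_by_prefix_spec : Claim_equal_lines_grouped_by_prefix := by
  intro ids _
  unfold Spec_lines_grouped_by_prefix lines_grouped_by_prefix lines_grouped_by_prefix_alt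
  match hord : pvSortByPrefix ids with
  | [] => simp [pvBlocks]
  | x :: t =>
    set p := pvVendorPrefix x with hp
    set a := (pvSplitRun t p).1 with ha
    set b := (pvSplitRun t p).2 with hb
    have hstep : pvAStep ([], none) x = ([x], some p) := by
      simp [pvAStep, ← hp]
    have hblocks : pvBlocks (x :: t) = (x :: a) :: pvBlocks b := by
      conv_lhs => rw [pvBlocks]
      simp only [pvSplitRun, ← hp, ne_eq, not_true_eq_false, if_false, ← ha, ← hb]
    have hsplit : a ++ b = t := pvSplitRun_append t p
    have hbhead : ∀ y s, b = y :: s → pvVendorPrefix y ≠ p :=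
      fun y s h => pvSplitRun_snd_head t p y s (by rw [← hb]; exact h)
    calc (List.foldl pvAStep ([], none) (x :: t)).1
        = (List.foldl pvAStep ([x], some p) (a ++ b)).1 := by
          rw [List.foldl_cons, hstep, hsplit]
      _ = (List.foldl pvAStep ([x] ++ a, some p) b).1 := by
          rw [pvAStep_run a p (pvSplitRun_fst_prefix t p) b]
      _ = List.foldl pvBStep ([x] ++ a) (pvBlocks b) :=
          pvMain b.length b le_rfl _ p (by simp) hbhead
      _ = List.foldl pvBStep [] (pvBlocks (x :: t)) := by
          rw [hblocks, List.foldl_cons]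
          have : pvBStep [] (x :: a) = [x] ++ a := by simp [pvBStep]
          rw [this]
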